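-- pv_equiv track=rewrite | github.com/MasterDD-L34D/Game | tools/etl/enrich_species_heuristic.py | derive_predator_prey_heuristic
-- ===== SOURCE A (Python) =====
-- def derive_predator_prey_heuristic(
--     entry: dict,
--     all_entries: list,
-- ) -> tuple[list, list]:
--     """ADR-2026-05-15 Phase 3 Path D extension — Pattern B heuristic for foodweb gap.
--
--     When foodweb scope misses (legacy species not in 5 biome files), derive
--     plausible predator-prey via clade_tag + biome_affinity heuristic:
--
--     - Apex (clade) in biome X → predates Threat/Bridge/Support in same biome
--     - Threat in biome X → predated_by Apex in biome X, predates lower-tier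
--     - Bridge in biome X → cross-biome predates/predated_by
--     - Keystone → mutualism preferred over predation (return empty here)
--
--     Returns (predates_on_list, predated_by_list).
--     Conservative: only fill when biome_affinity present AND ≥2 same-biome species.
--     """
--     biome = entry.get('biome_affinity') or ''
--     clade = entry.get('clade_tag') or ''
--     if not biome:
--         return ([], [])
--
--     # Hierarchy: Apex > Threat > Bridge > Support (top eats lower)
--     tier_rank = {'Apex': 4, 'Threat': 3, 'Bridge': 2, 'Support': 1}
--     my_rank = tier_rank.get(clade, 0)
--
--     same_biome = [
--         c for c in all_entries
--         if c.get('biome_affinity') == biome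
--         and c.get('species_id') != entry['species_id']
--     ]
--     if len(same_biome) < 2:
--         return ([], [])
--
--     predates_on = []
--     predated_by = []
--     for other in same_biome:
--         other_rank = tier_rank.get(other.get('clade_tag', ''), 0)
--         other_id = other.get('species_id')
--         if not other_id:
--             continue
--         if my_rank > other_rank > 0:
--             predates_on.append(other_id)
--         elif other_rank > my_rank > 0:
--             predated_by.append(other_id)
--
--     # Cap 3 each per readability + signal-to-noise
--     return (sorted(predates_on)[:3], sorted(predated_by)[:3])
-- ===== SOURCE B (Python) =====
-- def derive_predator_prey_heuristic(
--     entry: dict,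
--     all_entries: list,
-- ) -> tuple[list, list]:
--     """Bucket same-biome species by tier rank once, then take bucket ranges below/above my rank."""
--     biome = entry.get('biome_affinity') or ''
--     if not biome:
--         return ([], [])
--
--     tier_rank = {'Apex': 4, 'Threat': 3, 'Bridge': 2, 'Support': 1}
--     my_rank = tier_rank.get(entry.get('clade_tag') or '', 0)
--
--     same_biome = [
--         c for c in all_entries
--         if c.get('biome_affinity') == biome
--         and c.get('species_id') != entry['species_id']
--     ]
--     if len(same_biome) < 2:
--         return ([], [])
--
--     pairs = []
--     for c in same_biome:
--         r = tier_rank.get(c.get('clade_tag', ''), 0)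
--         oid = c.get('species_id')
--         if oid and r:
--             pairs.append((r, oid))
--
--     buckets = {1: [], 2: [], 3: [], 4: []}
--     for r, oid in pairs:
--         buckets[r].append(oid)
--
--     if my_rank == 0:
--         return ([], [])
--     predates_on = [s for r in range(1, my_rank) for s in buckets[r]]
--     predated_by = [s for r in range(my_rank + 1, 5) for s in buckets[r]]
--     return (sorted(predates_on)[:3], sorted(predated_by)[:3])
-- ===== Notes on version B (the rewrite author's own statement) =====
-- stated objective: alternative
-- what changed: Replaces A's interleaved two-accumulator classification loop (compare each candidate's rank to mine on the fly) by a rank-bucketing pass: same-biome species are grouped into buckets 1..4 by clade tier once, and predates_on/predated_by are assembled by concatenating the bucket ranges below resp. above my rank.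
import Mathlib
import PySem

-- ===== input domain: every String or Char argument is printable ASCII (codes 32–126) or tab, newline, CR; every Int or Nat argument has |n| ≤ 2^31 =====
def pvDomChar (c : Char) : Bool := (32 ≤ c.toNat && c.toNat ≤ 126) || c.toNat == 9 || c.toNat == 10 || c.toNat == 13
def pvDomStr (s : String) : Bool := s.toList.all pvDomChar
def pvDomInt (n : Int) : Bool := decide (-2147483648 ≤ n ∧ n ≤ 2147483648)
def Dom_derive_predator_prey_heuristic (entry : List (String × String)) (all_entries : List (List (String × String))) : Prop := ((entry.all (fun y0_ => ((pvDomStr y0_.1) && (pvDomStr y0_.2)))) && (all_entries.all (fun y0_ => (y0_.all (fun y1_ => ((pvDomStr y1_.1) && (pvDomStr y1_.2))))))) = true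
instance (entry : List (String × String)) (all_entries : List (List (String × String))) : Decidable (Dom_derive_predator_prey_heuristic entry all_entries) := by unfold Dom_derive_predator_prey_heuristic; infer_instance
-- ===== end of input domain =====

-- B replaces A's interleaved two-accumulator classification loop by one rank-bucketing pass
-- plus concatenation of the bucket ranges below/above the entry's own tier rank (objective: alternative).

-- d.get(k) on a Python dict given as an association list (first match wins)
def pvGet (d : List (String × String)) (k : String) : Option String :=
  (PySem.Dict.mk d).get? k

-- tier_rank.get(s, 0) for the literal dict {'Apex': 4, 'Threat': 3, 'Bridge': 2, 'Support': 1}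
def tierRank (s : String) : Int :=
  if s = "Apex" then 4 else if s = "Threat" then 3 else if s = "Bridge" then 2
  else if s = "Support" then 1 else 0

-- ===== PORT A =====
def derive_predator_prey_heuristic (entry : List (String × String)) (all_entries : List (List (String × String))) : List String × List String :=
  let biome := (pvGet entry "biome_affinity").getD ""
  let clade := (pvGet entry "clade_tag").getD ""
  if biome = "" then ([], [])
  else
    let my_rank := tierRank clade
    -- entry['species_id'] raises KeyError when absent; reached only when some c matches the
    -- biome (Pre_ then guarantees the key), so comparing the two Options is exact on Pre_
    let same_biome := all_entries.filter (fun c =>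
      (pvGet c "biome_affinity" == some biome) && (pvGet c "species_id" != pvGet entry "species_id"))
    if same_biome.length < 2 then ([], [])
    else
      let pq := same_biome.foldl (fun (acc : List String × List String) other =>
        let other_rank := tierRank ((pvGet other "clade_tag").getD "")
        match pvGet other "species_id" with
        | none => acc
        | some oid =>
          if oid = "" then acc
          else if my_rank > other_rank ∧ other_rank > 0 then (acc.1 ++ [oid], acc.2)
          else if other_rank > my_rank ∧ my_rank > 0 then (acc.1, acc.2 ++ [oid])
          else acc) ([], [])
      ((PySem.List.sorted pq.1 (fun x => x) false).take 3,
       (PySem.List.sorted pq.2 (fun x => x) false).take 3)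

-- ===== PORT B =====
def derive_predator_prey_heuristic_alt (entry : List (String × String)) (all_entries : List (List (String × String))) : List String × List String :=
  let biome := (pvGet entry "biome_affinity").getD ""
  if biome = "" then ([], [])
  else
    let my_rank := tierRank ((pvGet entry "clade_tag").getD "")
    let same_biome := all_entries.filter (fun c =>
      (pvGet c "biome_affinity" == some biome) && (pvGet c "species_id" != pvGet entry "species_id"))
    if same_biome.length < 2 then ([], [])
    else
      let pairs := same_biome.foldl (fun (acc : List (Int × String)) c =>
        let r := tierRank ((pvGet c "clade_tag").getD "")
        match pvGet c "species_id" with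
        | none => acc
        | some oid => if oid = "" ∨ r = 0 then acc else acc ++ [(r, oid)]) []
      let buckets := pairs.foldl (fun d p => d.modify p.1 ([] : List String) (fun t => t ++ [p.2]))
        (PySem.Dict.ofList [(1, ([] : List String)), (2, []), (3, []), (4, [])])
      if my_rank = 0 then ([], [])
      else
        -- buckets[r]: keys 1..4 are always present and every r drawn lies in 1..4, so getD is exact
        let predates_on := (PySem.List.pyRange 1 my_rank 1).flatMap (fun r => buckets.getD r [])
        let predated_by := (PySem.List.pyRange (my_rank + 1) 5 1).flatMap (fun r => buckets.getD r [])
        ((PySem.List.sorted predates_on (fun x => x) false).take 3,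
         (PySem.List.sorted predated_by (fun x => x) false).take 3)

-- ===== PRECONDITION & SPEC =====
-- A (and B) raise KeyError on entry['species_id'] exactly when the entry has a non-empty
-- biome_affinity, lacks the 'species_id' key, and some candidate shares that biome; Pre_
-- excludes precisely those raising inputs.
def Pre_derive_predator_prey_heuristic (entry : List (String × String)) (all_entries : List (List (String × String))) : Prop :=
  ((PySem.Dict.mk entry).get? "biome_affinity").getD "" = "" ∨
  (PySem.Dict.mk entry).contains "species_id" = true ∨
  ∀ c ∈ all_entries, (PySem.Dict.mk c).get? "biome_affinity" ≠ some (((PySem.Dict.mk entry).get? "biome_affinity").getD "")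
instance (entry : List (String × String)) (all_entries : List (List (String × String))) : Decidable (Pre_derive_predator_prey_heuristic entry all_entries) := by unfold Pre_derive_predator_prey_heuristic; infer_instance

def pvWitness_derive_predator_prey_heuristic : (List (String × String)) × (List (List (String × String))) :=
  ([("species_id", "s0"), ("biome_affinity", "f"), ("clade_tag", "Threat")],
   [[("species_id", "s1"), ("biome_affinity", "f"), ("clade_tag", "Apex")],
    [("species_id", "s2"), ("biome_affinity", "f"), ("clade_tag", "Support")]])

def Spec_derive_predator_prey_heuristic (entry : List (String × String)) (all_entries : List (List (String × String))) (out : List String × List String) : Prop := out = derive_predator_prey_heuristic_alt entry all_entries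
instance (entry : List (String × String)) (all_entries : List (List (String × String))) (out : List String × List String) : Decidable (Spec_derive_predator_prey_heuristic entry all_entries out) := by unfold Spec_derive_predator_prey_heuristic; infer_instance

-- ===== CLAIM (what is proved, stated in full; the proofs are below) =====
def Claim_equal_derive_predator_prey_heuristic : Prop := ∀ (entry : List (String × String)) (all_entries : List (List (String × String))), Dom_derive_predator_prey_heuristic entry all_entries → Pre_derive_predator_prey_heuristic entry all_entries → Spec_derive_predator_prey_heuristic entry all_entries (derive_predator_prey_heuristic entry all_entries)

-- ===== LEMMAS AND PROOFS =====

-- the (rank, species_id) pair B's collecting loop keeps for a candidate, as a filterMap step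
def pairF (c : List (String × String)) : Option (Int × String) :=
  let r := tierRank ((pvGet c "clade_tag").getD "")
  match pvGet c "species_id" with
  | none => none
  | some oid => if oid = "" ∨ r = 0 then none else some (r, oid)

lemma tierRank_cases (s : String) :
    tierRank s = 0 ∨ tierRank s = 1 ∨ tierRank s = 2 ∨ tierRank s = 3 ∨ tierRank s = 4 := by
  unfold tierRank; split_ifs <;> simp

lemma pairF_bounds {c : List (String × String)} {p : Int × String} (h : pairF c = some p) :
    1 ≤ p.1 ∧ p.1 ≤ 4 := by
  unfold pairF at h
  rcases hg : pvGet c "species_id" with _ | oid <;> rw [hg] at h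
  · simp at h
  · have h' : (if oid = "" ∨ tierRank ((pvGet c "clade_tag").getD "") = 0 then none
        else some (tierRank ((pvGet c "clade_tag").getD ""), oid)) = some p := h
    by_cases hcond : oid = "" ∨ tierRank ((pvGet c "clade_tag").getD "") = 0
    · simp [hcond] at h'
    · rw [if_neg hcond] at h'
      have hp := Option.some.inj h'
      rw [not_or] at hcond
      rcases tierRank_cases ((pvGet c "clade_tag").getD "") with h0 | h0 | h0 | h0 | h0 <;>
        rw [← hp] <;> simp <;> omega


-- B's collecting loop is the filterMap by pairF
lemma pairs_eq_filterMap (l : List (List (String × String))) (acc : List (Int × String)) :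
    l.foldl (fun (acc : List (Int × String)) c =>
        let r := tierRank ((pvGet c "clade_tag").getD "")
        match pvGet c "species_id" with
        | none => acc
        | some oid => if oid = "" ∨ r = 0 then acc else acc ++ [(r, oid)]) acc
      = acc ++ l.filterMap pairF := by
  induction l generalizing acc with
  | nil => simp
  | cons c l ih =>
    simp only [List.foldl_cons]
    rcases hg : pvGet c "species_id" with _ | oid
    · rw [List.filterMap_cons_none (by simp [pairF, hg])]
      simp only [hg]
      exact ih acc
    · by_cases hc : oid = "" ∨ tierRank ((pvGet c "clade_tag").getD "") = 0
      · rw [List.filterMap_cons_none (by simp only [pairF, hg]; rw [if_pos hc])]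
        simp only [hg, if_pos hc]
        exact ih acc
      · rw [List.filterMap_cons_some (by simp only [pairF, hg]; rw [if_neg hc])]
        simp only [hg, if_neg hc]
        rw [ih, List.append_assoc]
        rfl

-- A's classification loop, characterised as two filters over the pairF stream
lemma foldA_eq (m : Int) (l : List (List (String × String))) (acc : List String × List String) :
    l.foldl (fun (acc : List String × List String) other =>
        let other_rank := tierRank ((pvGet other "clade_tag").getD "")
        match pvGet other "species_id" with
        | none => acc
        | some oid =>
          if oid = "" then acc
          else if m > other_rank ∧ other_rank > 0 then (acc.1 ++ [oid], acc.2)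
          else if other_rank > m ∧ m > 0 then (acc.1, acc.2 ++ [oid])
          else acc) acc
      = (acc.1 ++ ((l.filterMap pairF).filter (fun p => decide (m > p.1 ∧ p.1 > 0))).map (·.2),
         acc.2 ++ ((l.filterMap pairF).filter (fun p => decide (p.1 > m ∧ m > 0))).map (·.2)) := by
  induction l generalizing acc with
  | nil => simp
  | cons c l ih =>
    simp only [List.foldl_cons]
    rcases hg : pvGet c "species_id" with _ | oid
    · rw [List.filterMap_cons_none (by simp [pairF, hg])]
      simp only [hg]
      exact ih acc
    · by_cases h0 : oid = ""
      · rw [List.filterMap_cons_none (by simp only [pairF, hg]; rw [if_pos (Or.inl h0)])]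
        simp only [hg, if_pos h0]
        exact ih acc
      · by_cases hz : tierRank ((pvGet c "clade_tag").getD "") = 0
        · rw [List.filterMap_cons_none (by simp only [pairF, hg]; rw [if_pos (Or.inr hz)])]
          have h1 : ¬ (m > tierRank ((pvGet c "clade_tag").getD "") ∧
              tierRank ((pvGet c "clade_tag").getD "") > 0) := by omega
          have h2 : ¬ (tierRank ((pvGet c "clade_tag").getD "") > m ∧ m > 0) := by omega
          simp only [hg, if_neg h0, if_neg h1, if_neg h2]
          exact ih acc
        · rw [List.filterMap_cons_some
            (by simp only [pairF, hg]; rw [if_neg (by tauto)])]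
          by_cases h1 : m > tierRank ((pvGet c "clade_tag").getD "") ∧
              tierRank ((pvGet c "clade_tag").getD "") > 0
          · have h2 : ¬ (tierRank ((pvGet c "clade_tag").getD "") > m ∧ m > 0) := by omega
            simp only [hg, if_neg h0, if_pos h1, if_neg h2]
            rw [ih]
            simp [List.filter_cons, h1, h2, List.append_assoc]
          · by_cases h2 : tierRank ((pvGet c "clade_tag").getD "") > m ∧ m > 0
            · simp only [hg, if_neg h0, if_neg h1, if_pos h2]
              rw [ih]
              simp [List.filter_cons, h1, h2, List.append_assoc]
            · simp only [hg, if_neg h0, if_neg h1, if_neg h2]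
              rw [ih]
              simp [List.filter_cons, h1, h2]

lemma filter_or_perm {α : Type} (l : List α) (p q : α → Bool)
    (h : ∀ a ∈ l, ¬(p a = true ∧ q a = true)) :
    (l.filter (fun a => p a || q a)).Perm (l.filter p ++ l.filter q) := by
  induction l with
  | nil => simp
  | cons a l ih =>
    have ih' := ih (fun x hx => h x (List.mem_cons_of_mem a hx))
    by_cases hp : p a = true
    · have hq : ¬ q a = true := fun hq => h a (List.mem_cons_self ..) ⟨hp, hq⟩
      simp only [List.filter_cons, hp, hq, Bool.or_true, Bool.true_or, if_true,
        Bool.false_eq_true, if_false, List.cons_append]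
      simpa using ih'.cons a
    · by_cases hq : q a = true
      · simp only [List.filter_cons, hp, hq, Bool.false_or, if_true, Bool.false_eq_true, if_false]
        exact ((ih'.cons a).trans List.perm_middle.symm)
      · simp only [List.filter_cons, hp, hq, Bool.or_false, Bool.false_eq_true, if_false]
        exact ih'

-- partitioning one filter over a duplicate-free list of rank values
lemma filter_mem_perm (l : List (Int × String)) (rs : List Int) (hnd : rs.Nodup) :
    (l.filter (fun p => decide (p.1 ∈ rs))).Perm
      (rs.flatMap (fun r => l.filter (fun p => p.1 == r))) := by
  induction rs with
  | nil => simp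
  | cons r rs ih =>
    have hnd' := (List.nodup_cons.mp hnd).2
    have hr : r ∉ rs := (List.nodup_cons.mp hnd).1
    have h1 : (l.filter (fun p => decide (p.1 ∈ r :: rs)))
        = l.filter (fun p => (p.1 == r) || decide (p.1 ∈ rs)) := by
      apply List.filter_congr
      intro a _; by_cases h : a.1 = r <;> simp [h, List.mem_cons]
    rw [h1, List.flatMap_cons]
    refine (filter_or_perm l _ _ ?_).trans (List.Perm.append_left _ (ih hnd'))
    rintro a _ ⟨ha1, ha2⟩
    exact hr (by simp at ha1 ha2; rw [← ha1]; exact ha2)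

lemma bucket_getD (pairs : List (Int × String)) (r : Int) :
    (pairs.foldl (fun d p => d.modify p.1 ([] : List String) (fun t => t ++ [p.2]))
        (PySem.Dict.ofList [(1, ([] : List String)), (2, []), (3, []), (4, [])])).getD r []
      = (pairs.filter (fun p => p.1 == r)).map (·.2) := by
  rw [PySem.Dict.getD_foldl_modify_append]
  have hz : (PySem.Dict.ofList [(1, ([] : List String)), (2, []), (3, []), (4, [])]).getD r [] = [] := by
    cases h1 : ((1:Int) == r) <;> cases h2 : ((2:Int) == r) <;> cases h3 : ((3:Int) == r) <;>
      cases h4 : ((4:Int) == r) <;>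
      simp [PySem.Dict.ofList, PySem.Dict.getD, PySem.Dict.get?, PySem.Dict.update,
        PySem.Dict.empty, PySem.Dict.insert, PySem.Dict.contains, List.find?, h1, h2, h3, h4]
  rw [hz, List.nil_append]

-- the sorted prefix A takes equals the sorted bucket concatenation B takes, for one side
lemma sorted_filter_eq_flatMap (pairs : List (Int × String)) (rs : List Int) (hnd : rs.Nodup)
    (cond : Int × String → Bool) (hc : ∀ p ∈ pairs, cond p = decide (p.1 ∈ rs)) :
    PySem.List.sorted ((pairs.filter cond).map (·.2)) (fun x => x) false
      = PySem.List.sorted (rs.flatMap (fun r => (pairs.filter (fun p => p.1 == r)).map (·.2))) (fun x => x) false := by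
  apply (PySem.List.sorted_id_eq_sorted_id_iff_perm _ _).mpr
  rw [List.filter_congr hc, ← List.map_flatMap]
  exact (filter_mem_perm pairs rs hnd).map (·.2)

-- ===== VERDICT (by name: the statement is the Claim_ definition above) =====
theorem derive_predator_prey_heuristic_spec : Claim_equal_derive_predator_prey_heuristic := by
  intro entry all_entries _ _
  unfold Spec_derive_predator_prey_heuristic
  unfold derive_predator_prey_heuristic derive_predator_prey_heuristic_alt
  by_cases hb : (pvGet entry "biome_affinity").getD "" = ""
  · simp only [hb, if_true]
  · simp only [if_neg hb]
    set sb := all_entries.filter (fun c =>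
      (pvGet c "biome_affinity" == some ((pvGet entry "biome_affinity").getD "")) &&
      (pvGet c "species_id" != pvGet entry "species_id")) with hsb
    by_cases hl : sb.length < 2
    · simp only [if_pos hl]
    · simp only [if_neg hl]
      rw [foldA_eq, pairs_eq_filterMap]
      simp only [List.nil_append]
      set m := tierRank ((pvGet entry "clade_tag").getD "") with hm
      set pairs := sb.filterMap pairF with hpairs
      have hub : ∀ p ∈ pairs, 1 ≤ p.1 ∧ p.1 ≤ 4 := by
        intro p hp
        rcases List.mem_filterMap.mp hp with ⟨c, _, hc⟩
        exact pairF_bounds hc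
      rcases tierRank_cases ((pvGet entry "clade_tag").getD "") with h0 | h0 | h0 | h0 | h0 <;>
        rw [← hm] at h0 <;> rw [h0]
      · rw [if_pos rfl]
        have e1 : (pairs.filter (fun p => decide ((0:Int) > p.1 ∧ p.1 > 0))) = [] := by
          apply List.filter_eq_nil_iff.mpr; intro p _; simp; omega
        have e2 : (pairs.filter (fun p => decide (p.1 > (0:Int) ∧ (0:Int) > 0))) = [] := by
          apply List.filter_eq_nil_iff.mpr; intro p _; simp
        rw [e1, e2]; rfl
      · rw [if_neg (show ¬ (1:Int) = 0 by norm_num)]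
        refine Prod.ext ?_ ?_ <;> dsimp only <;> apply congrArg (List.take 3) <;>
          simp only [bucket_getD]
        · rw [show PySem.List.pyRange 1 1 1 = ([] : List Int) from rfl]
          exact sorted_filter_eq_flatMap pairs [] (by decide) _
            (fun p hp => by obtain ⟨hp1, hp2⟩ := hub p hp; simp only [decide_eq_decide, List.mem_cons, List.mem_nil_iff, or_false, iff_false]; omega)
        · rw [show PySem.List.pyRange (1 + 1) 5 1 = [(2:Int), 3, 4] from rfl]
          exact sorted_filter_eq_flatMap pairs [2, 3, 4] (by decide) _
            (fun p hp => by obtain ⟨hp1, hp2⟩ := hub p hp; simp only [decide_eq_decide, List.mem_cons, List.mem_nil_iff, or_false, iff_false]; omega)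
      · rw [if_neg (show ¬ (2:Int) = 0 by norm_num)]
        refine Prod.ext ?_ ?_ <;> dsimp only <;> apply congrArg (List.take 3) <;>
          simp only [bucket_getD]
        · rw [show PySem.List.pyRange 1 2 1 = [(1:Int)] from rfl]
          exact sorted_filter_eq_flatMap pairs [1] (by decide) _
            (fun p hp => by obtain ⟨hp1, hp2⟩ := hub p hp; simp only [decide_eq_decide, List.mem_cons, List.mem_nil_iff, or_false, iff_false]; omega)
        · rw [show PySem.List.pyRange (2 + 1) 5 1 = [(3:Int), 4] from rfl]
          exact sorted_filter_eq_flatMap pairs [3, 4] (by decide) _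
            (fun p hp => by obtain ⟨hp1, hp2⟩ := hub p hp; simp only [decide_eq_decide, List.mem_cons, List.mem_nil_iff, or_false, iff_false]; omega)
      · rw [if_neg (show ¬ (3:Int) = 0 by norm_num)]
        refine Prod.ext ?_ ?_ <;> dsimp only <;> apply congrArg (List.take 3) <;>
          simp only [bucket_getD]
        · rw [show PySem.List.pyRange 1 3 1 = [(1:Int), 2] from rfl]
          exact sorted_filter_eq_flatMap pairs [1, 2] (by decide) _
            (fun p hp => by obtain ⟨hp1, hp2⟩ := hub p hp; simp only [decide_eq_decide, List.mem_cons, List.mem_nil_iff, or_false, iff_false]; omega)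
        · rw [show PySem.List.pyRange (3 + 1) 5 1 = [(4:Int)] from rfl]
          exact sorted_filter_eq_flatMap pairs [4] (by decide) _
            (fun p hp => by obtain ⟨hp1, hp2⟩ := hub p hp; simp only [decide_eq_decide, List.mem_cons, List.mem_nil_iff, or_false, iff_false]; omega)
      · rw [if_neg (show ¬ (4:Int) = 0 by norm_num)]
        refine Prod.ext ?_ ?_ <;> dsimp only <;> apply congrArg (List.take 3) <;>
          simp only [bucket_getD]
        · rw [show PySem.List.pyRange 1 4 1 = [(1:Int), 2, 3] from rfl]
          exact sorted_filter_eq_flatMap pairs [1, 2, 3] (by decide) _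
            (fun p hp => by obtain ⟨hp1, hp2⟩ := hub p hp; simp only [decide_eq_decide, List.mem_cons, List.mem_nil_iff, or_false, iff_false]; omega)
        · rw [show PySem.List.pyRange (4 + 1) 5 1 = ([] : List Int) from rfl]
          exact sorted_filter_eq_flatMap pairs [] (by decide) _
            (fun p hp => by obtain ⟨hp1, hp2⟩ := hub p hp; simp only [decide_eq_decide, List.mem_cons, List.mem_nil_iff, or_false, iff_false]; omega)
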